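-- pv_equiv track=rewrite | github.com/TechnoBlogger14o3/leetcode-solutions | Easy/2026-03-05-1758-Minimum-Changes-To-Make-Alternating-Binary-String/solution.py | minOperations
-- ===== SOURCE A (Python) =====
-- def minOperations(s: str) -> int:
--     count1 = count2 = 0
--     for i in range(len(s)):
--         expected_char1 = '0' if i % 2 == 0 else '1'
--         expected_char2 = '1' if i % 2 == 0 else '0'
--         if s[i] != expected_char1:
--             count1 += 1
--         if s[i] != expected_char2:
--             count2 += 1
--     return min(count1, count2)
-- ===== SOURCE B (Python) =====
-- def minOperations(s: str) -> int:
--     # Keep as many already-correct characters as possible: split the string into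
--     # the characters at even and odd positions, score each alternating target by
--     # how many characters it keeps, and change everything else.
--     even, odd = s[::2], s[1::2]
--     kept = max(even.count('0') + odd.count('1'),
--                even.count('1') + odd.count('0'))
--     return len(s) - kept
-- ===== Notes on version B (the rewrite author's own statement) =====
-- stated objective: idiomatic
-- what changed: B replaces A's indexed loop with two parity branches and two running mismatch counters by two stride slices (even/odd positions) scored with four str.count library calls: it keeps the larger number of already-correct characters and returns len(s) minus that, with no explicit loop at all.
import Mathlib
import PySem

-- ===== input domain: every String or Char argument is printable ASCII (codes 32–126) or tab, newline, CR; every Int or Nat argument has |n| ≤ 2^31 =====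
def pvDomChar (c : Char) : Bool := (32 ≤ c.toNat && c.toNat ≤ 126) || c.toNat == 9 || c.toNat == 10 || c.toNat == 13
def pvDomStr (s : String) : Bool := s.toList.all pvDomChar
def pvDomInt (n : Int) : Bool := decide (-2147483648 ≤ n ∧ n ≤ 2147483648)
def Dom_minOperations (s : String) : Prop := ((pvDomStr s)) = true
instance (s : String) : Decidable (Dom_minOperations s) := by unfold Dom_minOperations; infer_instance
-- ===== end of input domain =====

-- B replaces A's indexed loop (two parity branches, two running counters) by two stride
-- slices and four library counts (objective: idiomatic; same O(n) cost).

-- ===== PORT A =====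
def minOperations (s : String) : Int :=
  let cs := s.toList
  let r := (PySem.List.pyRange 0 (PySem.List.len cs)).foldl
      (fun (c : Int × Int) i =>
        let expected1 : Char := if PySem.Int.mod i 2 = 0 then '0' else '1'
        let expected2 : Char := if PySem.Int.mod i 2 = 0 then '1' else '0'
        ((if PySem.List.pyGetD cs i ' ' ≠ expected1 then c.1 + 1 else c.1),
         (if PySem.List.pyGetD cs i ' ' ≠ expected2 then c.2 + 1 else c.2)))
      ((0 : Int), (0 : Int))
  min r.1 r.2

-- ===== PORT B =====
def minOperations_alt (s : String) : Int :=
  let cs := s.toList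
  let even := (PySem.List.slice? cs none none 2).getD []     -- s[::2]; step 2 > 0, never raises
  let odd := (PySem.List.slice? cs (some 1) none 2).getD []  -- s[1::2]
  let kept := max ((PySem.Chars.count even ['0'] : Int) + (PySem.Chars.count odd ['1'] : Int))
                  ((PySem.Chars.count even ['1'] : Int) + (PySem.Chars.count odd ['0'] : Int))
  PySem.List.len cs - kept

-- ===== PRECONDITION & SPEC =====
def Spec_minOperations (s : String) (out : Int) : Prop := out = minOperations_alt s
instance (s : String) (out : Int) : Decidable (Spec_minOperations s out) := by unfold Spec_minOperations; infer_instance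

-- ===== CLAIM (what is proved, stated in full; the proofs are below) =====
def Claim_equal_minOperations : Prop := ∀ (s : String), Dom_minOperations s → Spec_minOperations s (minOperations s)

-- ===== LEMMAS AND PROOFS =====

-- characters at the even / odd positions of a list
def pvEvens : List Char → List Char
  | [] => []
  | [x] => [x]
  | x :: _ :: t => x :: pvEvens t

def pvOdds : List Char → List Char
  | [] => []
  | [_] => []
  | _ :: y :: t => y :: pvOdds t

lemma filterMap_evens (cs : List Char) :
    List.filterMap (fun k => cs[2 * k]?) (List.range ((cs.length + 1) / 2)) = pvEvens cs := by
  induction cs using pvEvens.induct with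
  | case1 => simp [pvEvens]
  | case2 x => simp [pvEvens]
  | case3 x y t ih =>
      have hl : ((x :: y :: t).length + 1) / 2 = (t.length + 1) / 2 + 1 := by
        simp; omega
      rw [hl, List.range_succ_eq_map, List.filterMap_cons, List.filterMap_map]
      simp only [Nat.mul_zero, List.getElem?_cons_zero, pvEvens]
      congr 1

lemma filterMap_odds (cs : List Char) :
    List.filterMap (fun k => cs[2 * k + 1]?) (List.range (cs.length / 2)) = pvOdds cs := by
  induction cs using pvOdds.induct with
  | case1 => simp [pvOdds]
  | case2 x => simp [pvOdds]
  | case3 x y t ih =>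
      have hl : (x :: y :: t).length / 2 = t.length / 2 + 1 := by simp; omega
      rw [hl, List.range_succ_eq_map, List.filterMap_cons, List.filterMap_map]
      simp only [Nat.mul_zero, Nat.zero_add, List.getElem?_cons_zero, List.getElem?_cons_succ,
        pvOdds]
      congr 1

lemma slice?_evens (cs : List Char) :
    PySem.List.slice? cs none none 2 = some (pvEvens cs) := by
  rw [PySem.List.slice?, PySem.List.sliceIndices]
  norm_num
  rw [← filterMap_evens cs]
  have hcount : (if 0 < cs.length then (((cs.length : Int) + 2 - 1) / 2).toNat else 0)
      = (cs.length + 1) / 2 := by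
    split_ifs with h <;> omega
  rw [hcount]
  apply List.filterMap_congr
  intro k _
  have h2 : ((2 : Int) * (k : Int)).toNat = 2 * k := by omega
  rw [h2]

lemma slice?_odds (cs : List Char) :
    PySem.List.slice? cs (some 1) none 2 = some (pvOdds cs) := by
  rw [PySem.List.slice?, PySem.List.sliceIndices]
  norm_num
  rw [← filterMap_odds cs]
  have hcount : (if 1 < cs.length
        then (((cs.length : Int) - min 1 (cs.length : Int) + 2 - 1) / 2).toNat else 0)
      = cs.length / 2 := by
    split_ifs with h
    · have h1 : min (1 : Int) (cs.length : Int) = 1 := by omega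
      rw [h1]; omega
    · omega
  rw [hcount]
  apply List.filterMap_congr
  intro k hk
  rw [List.mem_range] at hk
  have h1 : min (1 : Int) (cs.length : Int) = 1 := by omega
  have h2 : ((1 : Int) + 2 * (k : Int)).toNat = 2 * k + 1 := by omega
  rw [h1, h2]

lemma count_go_singleton (c : Char) :
    ∀ (l : List Char) (fuel acc : Nat), l.length ≤ fuel →
      PySem.Chars.count.go [c] fuel l acc = acc + l.count c := by
  intro l
  induction l with
  | nil => intro fuel acc _; cases fuel <;> simp [PySem.Chars.count.go]
  | cons x t ih =>
      intro fuel acc hle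
      cases fuel with
      | zero => simp at hle
      | succ f =>
          have hf : t.length ≤ f := by simp at hle; omega
          by_cases hx : x = c
          · have hpre : List.isPrefixOf [c] (x :: t) = true := by simp [List.isPrefixOf, hx]
            rw [PySem.Chars.count.go, if_pos hpre]
            simp only [List.length_cons, List.length_nil, List.drop_succ_cons, List.drop_zero]
            rw [ih f (acc + 1) hf, List.count_cons]
            simp [hx]
            omega
          · have hpre : List.isPrefixOf [c] (x :: t) = false := by
              simp [List.isPrefixOf]; exact fun h => absurd h.symm hx
            rw [PySem.Chars.count.go, if_neg (by simp [hpre])]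
            rw [ih f acc hf, List.count_cons]
            simp [hx]

lemma chars_count_singleton (l : List Char) (c : Char) :
    PySem.Chars.count l [c] = l.count c := by
  rw [PySem.Chars.count]
  simp [count_go_singleton c l l.length 0 (le_refl _)]

lemma mod_two_mul (m : Nat) : PySem.Int.mod (2 * (m : Int)) 2 = 0 := by
  rw [PySem.Int.mod_eq_zero_iff_dvd]
  exact ⟨(m : Int), rfl⟩

lemma mod_two_mul_add_one (m : Nat) : PySem.Int.mod (2 * (m : Int) + 1) 2 = 1 := by
  have h0 := PySem.Int.mod_nonneg (2 * (m : Int) + 1) (by norm_num : (0:Int) < 2)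
  have h1 := PySem.Int.mod_lt (2 * (m : Int) + 1) (by norm_num : (0:Int) < 2)
  have hd := PySem.Int.floordiv_mul_add_mod (2 * (m : Int) + 1) 2
  omega

lemma countP_enum_pat0 (cs : List Char) : ∀ (m : Nat),
    (PySem.List.enumerate cs (2 * (m : Int))).countP
        (fun p => decide (p.2 ≠ (if PySem.Int.mod p.1 2 = 0 then '0' else '1')))
      = (pvEvens cs).countP (fun ch => decide (ch ≠ '0'))
        + (pvOdds cs).countP (fun ch => decide (ch ≠ '1')) := by
  induction cs using pvEvens.induct with
  | case1 => intro m; simp [PySem.List.enumerate_nil, pvEvens, pvOdds]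
  | case2 x =>
      intro m
      simp [PySem.List.enumerate_cons, PySem.List.enumerate_nil, pvEvens, pvOdds,
        List.countP_cons]
  | case3 x y t ih =>
      intro m
      have h2 : 2 * (m : Int) + 1 + 1 = 2 * ((m + 1 : Nat) : Int) := by push_cast; ring
      rw [PySem.List.enumerate_cons, PySem.List.enumerate_cons, h2]
      simp only [List.countP_cons, ih (m + 1), mod_two_mul m, mod_two_mul_add_one m, pvEvens, pvOdds]
      norm_num [List.countP_cons]
      omega

lemma countP_enum_pat1 (cs : List Char) : ∀ (m : Nat),
    (PySem.List.enumerate cs (2 * (m : Int))).countP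
        (fun p => decide (p.2 ≠ (if PySem.Int.mod p.1 2 = 0 then '1' else '0')))
      = (pvEvens cs).countP (fun ch => decide (ch ≠ '1'))
        + (pvOdds cs).countP (fun ch => decide (ch ≠ '0')) := by
  induction cs using pvEvens.induct with
  | case1 => intro m; simp [PySem.List.enumerate_nil, pvEvens, pvOdds]
  | case2 x =>
      intro m
      simp [PySem.List.enumerate_cons, PySem.List.enumerate_nil, pvEvens, pvOdds,
        List.countP_cons]
  | case3 x y t ih =>
      intro m
      have h2 : 2 * (m : Int) + 1 + 1 = 2 * ((m + 1 : Nat) : Int) := by push_cast; ring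
      rw [PySem.List.enumerate_cons, PySem.List.enumerate_cons, h2]
      simp only [List.countP_cons, ih (m + 1), mod_two_mul m, mod_two_mul_add_one m, pvEvens, pvOdds]
      norm_num [List.countP_cons]
      omega

lemma countP_ne_add_count (l : List Char) (c : Char) :
    l.countP (fun ch => decide (ch ≠ c)) + l.count c = l.length := by
  have h1 := List.length_eq_countP_add_countP (fun ch => ch == c) (l := l)
  have h2 : l.countP (fun ch => decide (ch ≠ c))
      = l.countP (fun a => decide (¬((a == c) = true))) :=
    List.countP_congr (by intro x _; simp)
  rw [List.count, h2]
  omega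

lemma length_evens_add_odds (cs : List Char) :
    (pvEvens cs).length + (pvOdds cs).length = cs.length := by
  induction cs using pvEvens.induct with
  | case1 => simp [pvEvens, pvOdds]
  | case2 x => simp [pvEvens, pvOdds]
  | case3 x y t ih => simp [pvEvens, pvOdds]; omega

theorem minOperations_eq (s : String) :
    minOperations s = minOperations_alt s := by
  simp only [minOperations, minOperations_alt]
  rw [slice?_evens, slice?_odds]
  simp only [Option.getD_some]
  generalize hcs : s.toList = cs
  -- A's fold as two mismatch counts over the enumerated list
  have h1 :
      (PySem.List.pyRange 0 (PySem.List.len cs)).foldl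
        (fun (c : Int × Int) i =>
          ((if PySem.List.pyGetD cs i ' ' ≠ (if PySem.Int.mod i 2 = 0 then '0' else '1') then c.1 + 1 else c.1),
           (if PySem.List.pyGetD cs i ' ' ≠ (if PySem.Int.mod i 2 = 0 then '1' else '0') then c.2 + 1 else c.2)))
        ((0 : Int), (0 : Int))
      = (PySem.List.enumerate cs).foldl
          (fun (c : Int × Int) p =>
            ((if p.2 ≠ (if PySem.Int.mod p.1 2 = 0 then '0' else '1') then c.1 + 1 else c.1),
             (if p.2 ≠ (if PySem.Int.mod p.1 2 = 0 then '1' else '0') then c.2 + 1 else c.2)))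
          ((0 : Int), (0 : Int)) := by
    rw [PySem.List.enumerate_eq_map_pyRange cs ' ', List.foldl_map]
  have h2 :
      (PySem.List.enumerate cs).foldl
          (fun (c : Int × Int) p =>
            ((if p.2 ≠ (if PySem.Int.mod p.1 2 = 0 then '0' else '1') then c.1 + 1 else c.1),
             (if p.2 ≠ (if PySem.Int.mod p.1 2 = 0 then '1' else '0') then c.2 + 1 else c.2)))
          ((0 : Int), (0 : Int))
      = ((0 : Int) + ↑((PySem.List.enumerate cs).countP
            (fun p => decide (p.2 ≠ (if PySem.Int.mod p.1 2 = 0 then '0' else '1')))),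
         (0 : Int) + ↑((PySem.List.enumerate cs).countP
            (fun p => decide (p.2 ≠ (if PySem.Int.mod p.1 2 = 0 then '1' else '0'))))) := by
    rw [PySem.List.foldl_prod_mk
        (fun (a : Int) (p : Int × Char) => if p.2 ≠ (if PySem.Int.mod p.1 2 = 0 then '0' else '1') then a + 1 else a)
        (fun (a : Int) (p : Int × Char) => if p.2 ≠ (if PySem.Int.mod p.1 2 = 0 then '1' else '0') then a + 1 else a)]
    rw [PySem.List.foldl_ite_add_one, PySem.List.foldl_ite_add_one]
  rw [h1.trans h2]
  have hz : PySem.List.enumerate cs = PySem.List.enumerate cs (2 * ((0 : Nat) : Int)) := by norm_num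
  rw [hz, countP_enum_pat0 cs 0, countP_enum_pat1 cs 0]
  rw [chars_count_singleton, chars_count_singleton, chars_count_singleton, chars_count_singleton]
  have he0 := countP_ne_add_count (pvEvens cs) '0'
  have he1 := countP_ne_add_count (pvEvens cs) '1'
  have ho0 := countP_ne_add_count (pvOdds cs) '0'
  have ho1 := countP_ne_add_count (pvOdds cs) '1'
  have hlen := length_evens_add_odds cs
  simp only [PySem.List.len_eq]
  push_cast
  omega

-- ===== VERDICT (by name: the statement is the Claim_ definition above) =====
theorem minOperations_spec : Claim_equal_minOperations := by
  intro s _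
  unfold Spec_minOperations
  exact minOperations_eq s
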